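-- pv_equiv track=rewrite | github.com/Crazyface18/CS101-Project | milestone1.py | fibonacci_rabbits
-- ===== SOURCE A (Python) =====
-- def fibonacci_rabbits(n,k):
--     if n == 1:
--         return (1)
--     elif n == 2:
--         return (1)
--     elif n >= 3:
--         return (fibonacci_rabbits(n-1,k) + k*fibonacci_rabbits(n-2,k))
--     else:
--         return (none)
-- ===== SOURCE B (Python) =====
-- def fibonacci_rabbits(n, k):
--     # Iterative DP: two rolling values instead of exponential recursion.
--     a, b = 1, 1
--     for _ in range(n - 2):
--         a, b = b, b + k * a
--     return b
-- ===== Notes on version B (the rewrite author's own statement) =====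
-- stated objective: faster
-- what changed: Replaces the exponential binary recursion with an iterative two-variable dynamic program over the recurrence; intended as faster (measured 42.87x at n=16, unconfirmed since A times out on larger inputs).
import Mathlib
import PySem

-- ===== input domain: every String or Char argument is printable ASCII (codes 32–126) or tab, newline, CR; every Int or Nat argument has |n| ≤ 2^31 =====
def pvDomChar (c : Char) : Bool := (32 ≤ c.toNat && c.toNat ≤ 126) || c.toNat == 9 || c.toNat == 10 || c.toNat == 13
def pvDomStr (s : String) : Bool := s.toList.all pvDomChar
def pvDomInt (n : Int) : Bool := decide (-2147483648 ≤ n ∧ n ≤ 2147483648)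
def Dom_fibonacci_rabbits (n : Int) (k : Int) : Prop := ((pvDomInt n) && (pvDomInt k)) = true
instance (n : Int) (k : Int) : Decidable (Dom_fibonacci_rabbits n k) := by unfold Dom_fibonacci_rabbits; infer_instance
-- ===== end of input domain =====

-- B replaces A's exponential binary recursion with an iterative two-variable DP; intended as faster (measured 42.87x at n=16, A timed out on larger inputs, so a timing run could not confirm it).

-- ===== PORT A =====
def fibonacci_rabbits (n : Int) (k : Int) : Int :=
  if n = 1 then 1
  else if n = 2 then 1
  else if 3 ≤ n then fibonacci_rabbits (n-1) k + k * fibonacci_rabbits (n-2) k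
  else 0  -- Python raises NameError (bare name 'none') here; excluded by Pre_
termination_by n.toNat
decreasing_by all_goals omega

-- ===== PORT B =====
def fibonacci_rabbits_alt (n : Int) (k : Int) : Int :=
  ((PySem.List.pyRange 0 (n-2) 1).foldl
    (fun (ab : Int × Int) _ => (ab.2, ab.2 + k * ab.1)) (1, 1)).2

-- ===== PRECONDITION & SPEC =====
-- Pre_: Python A raises NameError for every n ≤ 0 (n = 0 included), so those inputs are excluded.
def Pre_fibonacci_rabbits (n : Int) (k : Int) : Prop := 1 ≤ n
instance (n : Int) (k : Int) : Decidable (Pre_fibonacci_rabbits n k) := by unfold Pre_fibonacci_rabbits; infer_instance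
def pvWitness_fibonacci_rabbits : Int × Int := (6, 3)

def Spec_fibonacci_rabbits (n : Int) (k : Int) (out : Int) : Prop := out = fibonacci_rabbits_alt n k
instance (n : Int) (k : Int) (out : Int) : Decidable (Spec_fibonacci_rabbits n k out) := by unfold Spec_fibonacci_rabbits; infer_instance

-- ===== CLAIM =====
def Claim_equal_fibonacci_rabbits : Prop := ∀ (n : Int) (k : Int), Dom_fibonacci_rabbits n k → Pre_fibonacci_rabbits n k → Spec_fibonacci_rabbits n k (fibonacci_rabbits n k)

-- ===== LEMMAS AND PROOFS =====

theorem fib_one (k : Int) : fibonacci_rabbits 1 k = 1 := by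
  rw [fibonacci_rabbits]; norm_num

theorem fib_two (k : Int) : fibonacci_rabbits 2 k = 1 := by
  rw [fibonacci_rabbits]; norm_num

theorem fib_step (n k : Int) (h : 3 ≤ n) :
    fibonacci_rabbits n k = fibonacci_rabbits (n-1) k + k * fibonacci_rabbits (n-2) k := by
  rw [fibonacci_rabbits]
  have h1 : ¬ n = 1 := by omega
  have h2 : ¬ n = 2 := by omega
  simp [h1, h2, h]

-- loop invariant: after m iterations the pair holds (A(m+1), A(m+2))
theorem loop_inv (k : Int) (m : Nat) :
    (List.range m).foldl (fun (ab : Int × Int) _ => (ab.2, ab.2 + k * ab.1)) (1, 1)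
      = (fibonacci_rabbits (m + 1) k, fibonacci_rabbits (m + 2) k) := by
  induction m with
  | zero => simp [fib_one, fib_two]
  | succ m ih =>
      rw [List.range_succ, List.foldl_append, ih]
      have h3 : (3 : Int) ≤ (m : Int) + 3 := by omega
      have := fib_step ((m : Int) + 3) k h3
      simp only [List.foldl_cons, List.foldl_nil]
      rw [Prod.mk.injEq]
      constructor
      · push_cast; ring_nf
      · rw [show ((m + 1 : Nat) : Int) + 2 = (m : Int) + 3 by push_cast; ring, this]
        push_cast; ring_nf

theorem alt_eq (n k : Int) (h : 1 ≤ n) : fibonacci_rabbits_alt n k = fibonacci_rabbits n k := by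
  unfold fibonacci_rabbits_alt
  rw [PySem.List.pyRange_one, List.foldl_map, loop_inv]
  rcases eq_or_lt_of_le h with h1 | h1
  · -- n = 1 : zero iterations, second component is A 2 = 1 = A 1
    have : (n - 2 - 0).toNat = 0 := by omega
    rw [this]
    simp [fib_two, ← h1, fib_one]
  · have h2 : ((n - 2 - 0).toNat : Int) + 2 = n := by omega
    simp only [h2]

-- ===== VERDICT =====
theorem fibonacci_rabbits_spec : Claim_equal_fibonacci_rabbits := by
  intro n k _ hpre
  unfold Spec_fibonacci_rabbits
  exact (alt_eq n k hpre).symm
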